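-- pv_equiv track=rewrite | github.com/fionazhong518/CSE30 | spellcheck-python-startcode-main/spellcheck.py | linearSearch_alice
-- ===== SOURCE A (Python) =====
-- def linearSearch_alice(dictionary, aliceWords):
--     num_error = 0
--     #for i in range(len(dictionary)):
--     for i in range(len(aliceWords)):
--         word = aliceWords[i].lower()
--         index = linearSearch(dictionary, word)
--         if index == -1:
--             num_error += 1
--     return num_error
--
-- def linearSearch(anArray, item):
--     '''
--     Search the provided array for the provided item using the linear search algorithm.
--
--     parameter:
--     anArray: an array to search through
--     item: an item to look for in the array
--
--     return:
--     If the item is found, return the index where found.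
--     If the item is not found, return -1.
--     '''
--     for i in range(len(anArray)):
--         if item == anArray[i]:
--             return i
--     else:
--         return -1
-- ===== SOURCE B (Python) =====
-- def linearSearch_alice(dictionary, aliceWords):
--     sorted_dict = sorted(dictionary)
--     n = len(sorted_dict)
--     num_error = 0
--     for w in aliceWords:
--         lw = w.lower()
--         lo, hi = 0, n
--         while lo < hi:
--             mid = (lo + hi) // 2
--             if sorted_dict[mid] < lw:
--                 lo = mid + 1
--             else:
--                 hi = mid
--         if not (lo < n and sorted_dict[lo] == lw):
--             num_error += 1
--     return num_error
-- ===== Notes on version B (the rewrite author's own statement) =====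
-- stated objective: faster
-- what changed: B sorts a copy of the dictionary once and decides membership of each lowercased word by a hand-coded binary search, replacing A's per-word linear scan of the dictionary.
import Mathlib
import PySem

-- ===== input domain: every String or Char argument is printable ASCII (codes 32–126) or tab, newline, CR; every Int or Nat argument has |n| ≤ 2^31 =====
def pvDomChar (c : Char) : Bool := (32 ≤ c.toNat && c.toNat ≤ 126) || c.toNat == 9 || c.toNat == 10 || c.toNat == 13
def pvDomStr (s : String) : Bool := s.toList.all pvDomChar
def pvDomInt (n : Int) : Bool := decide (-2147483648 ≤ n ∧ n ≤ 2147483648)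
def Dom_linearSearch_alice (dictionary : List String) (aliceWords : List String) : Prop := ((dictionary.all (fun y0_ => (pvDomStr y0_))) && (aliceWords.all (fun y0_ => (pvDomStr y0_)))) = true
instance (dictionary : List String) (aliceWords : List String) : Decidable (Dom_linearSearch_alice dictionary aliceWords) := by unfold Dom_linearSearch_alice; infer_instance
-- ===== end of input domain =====

-- B sorts a copy of the dictionary once and decides each lowercased word's membership by binary search
-- instead of A's per-word linear scan (objective: faster; measured).


-- ===== PORT A =====
-- 'for i in range(len(anArray)): if item == anArray[i]: return i' / 'return -1'
def linearSearchGo (anArray : List String) (item : String) (i : Nat) : Int :=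
  if h : i < anArray.length then
    if item == anArray[i] then (i : Int) else linearSearchGo anArray item (i + 1)
  else -1
termination_by anArray.length - i

def linearSearch (anArray : List String) (item : String) : Int :=
  linearSearchGo anArray item 0

def linearSearch_alice (dictionary : List String) (aliceWords : List String) : Int :=
  aliceWords.foldl (fun num_error w =>
    let word := PySem.Str.lower w
    let index := linearSearch dictionary word
    if index == -1 then num_error + 1 else num_error) 0

-- ===== PORT B =====
-- 'while lo < hi: mid = (lo+hi)//2; if sorted_dict[mid] < lw: lo = mid+1 else: hi = mid'
-- (lo+hi and the // divisor are nonnegative, so Nat division is exact here; the index mid is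
--  in range whenever lo < hi ≤ length, so getD only totalises the list access)
def bsearchGo (sd : List String) (lw : String) (lo hi : Nat) : Nat :=
  if lo < hi then
    let mid := (lo + hi) / 2
    if sd.getD mid "" < lw then bsearchGo sd lw (mid + 1) hi
    else bsearchGo sd lw lo mid
  else lo
termination_by hi - lo
decreasing_by all_goals omega

def linearSearch_alice_alt (dictionary : List String) (aliceWords : List String) : Int :=
  let sorted_dict := PySem.List.sorted dictionary (fun x => x)
  let n := sorted_dict.length
  aliceWords.foldl (fun num_error w =>
    let lw := PySem.Str.lower w
    let lo := bsearchGo sorted_dict lw 0 n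
    if ¬ (lo < n ∧ sorted_dict.getD lo "" = lw) then num_error + 1 else num_error) 0

-- ===== PRECONDITION & SPEC =====
def Spec_linearSearch_alice (dictionary : List String) (aliceWords : List String) (out : Int) : Prop := out = linearSearch_alice_alt dictionary aliceWords
instance (dictionary : List String) (aliceWords : List String) (out : Int) : Decidable (Spec_linearSearch_alice dictionary aliceWords out) := by unfold Spec_linearSearch_alice; infer_instance

-- ===== CLAIM (what is proved, stated in full; the proofs are below) =====
def Claim_equal_linearSearch_alice : Prop := ∀ (dictionary : List String) (aliceWords : List String), Dom_linearSearch_alice dictionary aliceWords → Spec_linearSearch_alice dictionary aliceWords (linearSearch_alice dictionary aliceWords)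

-- ===== LEMMAS AND PROOFS =====

-- A's linear search returns -1 exactly when the item is absent from the tail it scans.
theorem linearSearchGo_neg1_iff (anArray : List String) (item : String) (i : Nat) :
    linearSearchGo anArray item i = -1 ↔ item ∉ anArray.drop i := by
  fun_induction linearSearchGo anArray item i with
  | case1 i h heq =>
    rw [List.drop_eq_getElem_cons h]
    simp only [List.mem_cons, not_or]
    constructor
    · intro hc; omega
    · intro ⟨h1, _⟩; exact absurd (eq_of_beq heq) h1
  | case2 i h heq ih =>
    rw [List.drop_eq_getElem_cons h]
    simp only [List.mem_cons, not_or]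
    rw [ih]
    constructor
    · intro h2; exact ⟨fun he => by simp [he] at heq, h2⟩
    · intro ⟨_, h2⟩; exact h2
  | case3 i h =>
    have : anArray.drop i = [] := List.drop_eq_nil_of_le (by omega)
    simp [this]

theorem linearSearch_neg1_iff (anArray : List String) (item : String) :
    linearSearch anArray item = -1 ↔ item ∉ anArray := by
  simpa [linearSearch] using linearSearchGo_neg1_iff anArray item 0

-- In a ≤-sorted list, getD is monotone on in-range indices.
theorem sd_mono (sd : List String) (hsort : List.Pairwise (· ≤ ·) sd)
    (p q : Nat) (hpq : p ≤ q) (hq : q < sd.length) :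
    sd.getD p "" ≤ sd.getD q "" := by
  rw [List.getD_eq_getElem sd _ (by omega), List.getD_eq_getElem sd _ hq]
  rcases Nat.lt_or_eq_of_le hpq with h | h
  · exact (List.pairwise_iff_getElem.mp hsort) p q (by omega) hq h
  · simp [h]

-- Binary-search invariant: elements left of the result are < lw, elements from the result on are ≥ lw.
theorem bsearchGo_post (sd : List String) (lw : String)
    (hsort : List.Pairwise (· ≤ ·) sd) (lo hi : Nat) :
    hi ≤ sd.length →
    (∀ j, j < lo → sd.getD j "" < lw) →
    (∀ j, hi ≤ j → j < sd.length → lw ≤ sd.getD j "") →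
    (∀ j, j < bsearchGo sd lw lo hi → sd.getD j "" < lw) ∧
      (∀ j, bsearchGo sd lw lo hi ≤ j → j < sd.length → lw ≤ sd.getD j "") := by
  fun_induction bsearchGo sd lw lo hi with
  | case1 lo hi h mid hlt ih =>
    intro hhi hlow hhigh
    refine ih hhi (fun j hj => ?_) hhigh
    rcases Nat.lt_or_eq_of_le (Nat.le_of_lt_succ hj) with hj' | hj'
    · exact lt_of_le_of_lt (sd_mono sd hsort j mid (by omega) (by omega)) hlt
    · simpa [hj'] using hlt
  | case2 lo hi h mid hge ih =>
    intro hhi hlow hhigh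
    refine ih (by omega) hlow (fun j hj hjl => ?_)
    exact le_trans (not_lt.mp hge) (sd_mono sd hsort mid j hj hjl)
  | case3 lo hi h =>
    intro hhi hlow hhigh
    exact ⟨hlow, fun j hj hjl => hhigh j (by omega) hjl⟩

-- B's found-test is membership in the sorted dictionary.
theorem bsearch_found_iff (sd : List String) (lw : String)
    (hsort : List.Pairwise (· ≤ ·) sd) :
    (bsearchGo sd lw 0 sd.length < sd.length ∧
      sd.getD (bsearchGo sd lw 0 sd.length) "" = lw) ↔ lw ∈ sd := by
  obtain ⟨h1, h2⟩ := bsearchGo_post sd lw hsort 0 sd.length (le_refl _)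
    (fun j hj => by omega) (fun j hj hjl => by omega)
  set r := bsearchGo sd lw 0 sd.length with hr
  constructor
  · rintro ⟨hrl, hre⟩
    rw [List.getD_eq_getElem sd _ hrl] at hre
    exact hre ▸ List.getElem_mem hrl
  · intro hmem
    obtain ⟨k, hk, hke⟩ := List.getElem_of_mem hmem
    have hkr : r ≤ k := by
      by_contra hc
      have := h1 k (by omega)
      rw [List.getD_eq_getElem sd _ hk, hke] at this
      exact lt_irrefl _ this
    have hrl : r < sd.length := by omega
    have hle : lw ≤ sd.getD r "" := h2 r (le_refl _) hrl
    have hge : sd.getD r "" ≤ lw := by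
      calc sd.getD r "" ≤ sd.getD k "" := sd_mono sd hsort r k hkr hk
        _ = lw := by rw [List.getD_eq_getElem sd _ hk, hke]
    exact ⟨hrl, le_antisymm hge hle⟩

-- ===== VERDICT (by name: the statement is the Claim_ definition above) =====
theorem linearSearch_alice_spec : Claim_equal_linearSearch_alice := by
  intro dictionary aliceWords _
  unfold Spec_linearSearch_alice linearSearch_alice linearSearch_alice_alt
  dsimp only
  refine PySem.List.foldl_congr_mem _ _ _ _ (fun acc w _ => ?_)
  dsimp only
  set sd := PySem.List.sorted dictionary (fun x => x) with hsd
  have hsort : List.Pairwise (· ≤ ·) sd := PySem.List.sorted_pairwise dictionary (fun x => x)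
  set lw := PySem.Str.lower w with hlw
  have hfound := bsearch_found_iff sd lw hsort
  have hmem : lw ∈ sd ↔ lw ∈ dictionary := (PySem.List.sorted_perm dictionary (fun x => x) false).mem_iff
  have hA := linearSearch_neg1_iff dictionary lw
  by_cases hf : (bsearchGo sd lw 0 sd.length < sd.length ∧ sd.getD (bsearchGo sd lw 0 sd.length) "" = lw)
  · have hin : lw ∈ dictionary := hmem.mp (hfound.mp hf)
    have hne : ¬ linearSearch dictionary lw = -1 := fun he => (hA.mp he) hin
    rw [if_neg (by simpa [beq_iff_eq] using hne), if_neg (not_not_intro hf)]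
  · have hnin : lw ∉ dictionary := fun hm => hf (hfound.mpr (hmem.mpr hm))
    rw [if_pos (by simpa [beq_iff_eq] using hA.mpr hnin), if_pos hf]
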